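-- pv_equiv track=rewrite | github.com/dankolbman/adventofcode | 2015/day11.py | next_try
-- ===== SOURCE A (Python) =====
-- def next_try(pwd):
--   if 'i' in pwd:
--     h, s, t = pwd.partition('i')
--     pwd = h + 'j' + 'a'*len(t)
--   if 'o' in pwd:
--     h, s, t = pwd.partition('o')
--     pwd = h + 'p' + 'a'*len(t)
--   if 'l' in pwd:
--     h, s, t = pwd.partition('l')
--     pwd = h + 'm' + 'a'*len(t)
--
--   # Shift recursively
--   if pwd[-1] == 'z':
--     return next_try(pwd[:-1]) + 'a'
--   else:
--     return pwd[:-1] + chr(ord(pwd[-1])+1)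
-- ===== SOURCE B (Python) =====
-- def next_try(pwd):
--     # scrub: bump the first forbidden letter, everything after it becomes 'a'
--     chars = list(pwd)
--     for i, c in enumerate(chars):
--         if c in 'iol':
--             chars[i] = chr(ord(c) + 1)
--             chars[i + 1:] = 'a' * (len(chars) - i - 1)
--             break
--     s = ''.join(chars)
--     # increment with carry: trailing 'z's roll over to 'a', the digit before them bumps
--     head = s.rstrip('z')
--     return head[:-1] + chr(ord(head[-1]) + 1) + 'a' * (len(s) - len(head))
-- ===== Notes on version B (the rewrite author's own statement) =====
-- stated objective: alternative
-- what changed: A's three partition-and-rebuild passes become one left-to-right scan that bumps the first forbidden letter and blanks the rest, and A's recursion (which re-runs all three scrub passes at every carry step) becomes a single rstrip of trailing 'z's plus one character increment; Pre_ excludes the empty and all-'z' strings, on which A raises IndexError (B does too).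
-- outside the precondition, e.g. on next_try('z'): A raises IndexError, B raises IndexError
import Mathlib
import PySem

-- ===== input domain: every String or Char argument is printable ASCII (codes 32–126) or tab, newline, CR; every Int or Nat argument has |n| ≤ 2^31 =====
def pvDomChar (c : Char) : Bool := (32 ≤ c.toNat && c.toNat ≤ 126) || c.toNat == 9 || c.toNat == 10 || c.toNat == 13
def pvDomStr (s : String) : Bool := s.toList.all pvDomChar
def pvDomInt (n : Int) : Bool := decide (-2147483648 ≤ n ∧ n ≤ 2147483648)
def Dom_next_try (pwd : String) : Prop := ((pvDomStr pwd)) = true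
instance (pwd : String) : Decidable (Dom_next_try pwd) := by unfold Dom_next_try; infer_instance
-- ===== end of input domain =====

-- B replaces A's three partition-and-rewrite passes by one left-to-right scan, and A's
-- re-scrubbing carry recursion by rstrip('z') plus one increment (objective: alternative).

-- ===== PORT A =====
-- str.partition(sep) for a one-character sep, ported by hand (exact: head before the
-- first occurrence, then the rest after it); the Python guard "'i' in pwd" is Chars.isIn.
def pvScrub1 (cs : List Char) (bad rep : Char) : List Char :=
  if PySem.Chars.isIn [bad] cs = true then
    ((cs.takeWhile (fun c => !(c == bad))) ++ [rep])
      ++ List.replicate ((cs.dropWhile (fun c => !(c == bad))).tail).length 'a'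
  else cs

-- length is preserved by one scrub pass (cited by nextTryCore's decreasing_by)
theorem pvScrub1_length (cs : List Char) (bad rep : Char) :
    (pvScrub1 cs bad rep).length = cs.length := by
  unfold pvScrub1
  split_ifs with h
  · have hmem : bad ∈ cs := by
      have hinf := (PySem.Chars.isIn_iff_infix [bad] cs).mp h
      exact hinf.subset (by simp)
    have hd : cs.dropWhile (fun c => !(c == bad)) ≠ [] := by
      intro hnil
      have := List.dropWhile_eq_nil_iff.mp hnil bad hmem
      simp at this
    have hsplit : cs.takeWhile (fun c => !(c == bad)) ++ cs.dropWhile (fun c => !(c == bad)) = cs :=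
      List.takeWhile_append_dropWhile
    have hlen : (cs.takeWhile (fun c => !(c == bad))).length
        + (cs.dropWhile (fun c => !(c == bad))).length = cs.length := by
      rw [← List.length_append, hsplit]
    have hd1 : 0 < (cs.dropWhile (fun c => !(c == bad))).length :=
      List.length_pos_of_ne_nil hd
    simp only [List.length_append, List.length_cons, List.length_replicate,
      List.length_tail, List.length_nil]
    omega
  · rfl

def nextTryCore (cs : List Char) : List Char :=
  let c1 := pvScrub1 cs 'i' 'j'
  let c2 := pvScrub1 c1 'o' 'p'
  let c3 := pvScrub1 c2 'l' 'm'
  match hg : PySem.List.pyGet? c3 (-1) with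
  | none => []  -- pwd[-1] raises IndexError on the empty string; excluded by Pre_next_try
  | some c =>
    if c = 'z' then nextTryCore (PySem.List.slice c3 none (some (-1))) ++ ['a']
    else PySem.List.slice c3 none (some (-1)) ++ [Char.ofNat (c.toNat + 1)]
termination_by cs.length
decreasing_by
  have hne : c3 ≠ [] := by
    intro hnil
    rw [hnil] at hg
    simp [PySem.List.pyGet?] at hg
  have h3 : c3.length = cs.length := by
    simp only [c3, c2, c1]
    rw [pvScrub1_length, pvScrub1_length, pvScrub1_length]
  have hpos : 0 < c3.length := List.length_pos_of_ne_nil hne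
  rw [PySem.List.slice_to_neg_one]
  show c3.dropLast.length < cs.length
  simp only [List.length_dropLast]
  omega

def next_try (pwd : String) : String := String.ofList (nextTryCore pwd.toList)

-- ===== PORT B =====
-- Source B's single scan: bump the first forbidden letter, every later char becomes 'a'
def pvScan : List Char → List Char
  | [] => []
  | c :: rest =>
    if c == 'i' || c == 'o' || c == 'l' then
      Char.ofNat (c.toNat + 1) :: rest.map (fun _ => 'a')
    else c :: pvScan rest

-- s.rstrip('z'), ported by hand (exact: drop the maximal run of trailing 'z's)
def pvRstripZ (cs : List Char) : List Char :=
  (cs.reverse.dropWhile (fun c => c == 'z')).reverse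

def next_try_alt (pwd : String) : String :=
  let s := pvScan pwd.toList
  let head := pvRstripZ s
  match PySem.List.pyGet? head (-1) with
  | none => ""  -- head[-1] raises IndexError in Source B; excluded by Pre_next_try
  | some c =>
    String.ofList (PySem.List.slice head none (some (-1)) ++ [Char.ofNat (c.toNat + 1)]
      ++ List.replicate (s.length - head.length) 'a')

-- ===== PRECONDITION & SPEC =====
-- Pre_ excludes exactly the inputs on which A raises IndexError: the empty string and
-- strings consisting only of 'z' (B raises IndexError there too).
def Pre_next_try (pwd : String) : Prop := pwd.toList.any (fun c => !(c == 'z')) = true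
instance (pwd : String) : Decidable (Pre_next_try pwd) := by unfold Pre_next_try; infer_instance

def pvWitness_next_try : String := "ab"

def Spec_next_try (pwd : String) (out : String) : Prop := out = next_try_alt pwd
instance (pwd : String) (out : String) : Decidable (Spec_next_try pwd out) := by unfold Spec_next_try; infer_instance

-- ===== CLAIM (what is proved, stated in full; the proofs are below) =====
def Claim_equal_next_try : Prop := ∀ (pwd : String), Dom_next_try pwd → Pre_next_try pwd → Spec_next_try pwd (next_try pwd)

-- ===== LEMMAS AND PROOFS =====

-- one-step unfolding of A's recursion, with a plain (non-dependent) match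
theorem nextTryCore_unfold (cs : List Char) :
    nextTryCore cs =
      match PySem.List.pyGet? (pvScrub1 (pvScrub1 (pvScrub1 cs 'i' 'j') 'o' 'p') 'l' 'm') (-1) with
      | none => []
      | some c =>
        if c = 'z' then
          nextTryCore (PySem.List.slice
            (pvScrub1 (pvScrub1 (pvScrub1 cs 'i' 'j') 'o' 'p') 'l' 'm') none (some (-1))) ++ ['a']
        else
          PySem.List.slice (pvScrub1 (pvScrub1 (pvScrub1 cs 'i' 'j') 'o' 'p') 'l' 'm')
            none (some (-1)) ++ [Char.ofNat (c.toNat + 1)] := by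
  rw [nextTryCore]
  split <;> rename_i heq <;> rw [heq]

-- membership form of the Python guard "'b' in s"
theorem pvIsIn_singleton (b : Char) (cs : List Char) :
    PySem.Chars.isIn [b] cs = true ↔ b ∈ cs := by
  rw [PySem.Chars.isIn_iff_infix]
  constructor
  · intro h; exact (List.singleton_sublist).mp h.sublist
  · intro h
    obtain ⟨s, t, rfl⟩ := List.mem_iff_append.mp h
    exact ⟨s, t, by simp⟩

-- one scrub pass is the identity when the letter is absent
theorem pvScrub1_of_not_mem {b : Char} {cs : List Char} (h : b ∉ cs) (rep : Char) :
    pvScrub1 cs b rep = cs := by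
  unfold pvScrub1
  rw [if_neg]
  intro hin
  exact h ((pvIsIn_singleton b cs).mp hin)

-- one scrub pass when the letter is at the head
theorem pvScrub1_head (b rep : Char) (cs : List Char) :
    pvScrub1 (b :: cs) b rep = rep :: List.replicate cs.length 'a' := by
  unfold pvScrub1
  rw [if_pos ((pvIsIn_singleton b _).mpr (List.mem_cons_self))]
  simp

-- one scrub pass skips a non-matching head
theorem pvScrub1_cons_of_ne {c b : Char} (h : c ≠ b) (rep : Char) (cs : List Char) :
    pvScrub1 (c :: cs) b rep = c :: pvScrub1 cs b rep := by
  by_cases hm : b ∈ cs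
  · unfold pvScrub1
    rw [if_pos ((pvIsIn_singleton b _).mpr (List.mem_cons_of_mem _ hm)),
        if_pos ((pvIsIn_singleton b _).mpr hm)]
    simp [h]
  · have h1 : b ∉ c :: cs := by simp [Ne.symm h, hm]
    rw [pvScrub1_of_not_mem h1, pvScrub1_of_not_mem hm]

-- A's three sequential passes compute exactly B's single scan
theorem pvScrubA_eq_scan (cs : List Char) :
    pvScrub1 (pvScrub1 (pvScrub1 cs 'i' 'j') 'o' 'p') 'l' 'm' = pvScan cs := by
  induction cs with
  | nil => simp [pvScrub1_of_not_mem, pvScan]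
  | cons c cs ih =>
    by_cases hi : c = 'i'
    · subst hi
      have ho' : ('o' : Char) ∉ 'j' :: List.replicate cs.length 'a' := by
        simp [List.mem_replicate]
      have hl' : ('l' : Char) ∉ 'j' :: List.replicate cs.length 'a' := by
        simp [List.mem_replicate]
      rw [pvScrub1_head, pvScrub1_of_not_mem ho', pvScrub1_of_not_mem hl', pvScan]
      simp [List.map_const']
    · by_cases ho : c = 'o'
      · subst ho
        have hl' : ('l' : Char) ∉ 'p' :: List.replicate cs.length 'a' := by
          simp [List.mem_replicate]
        rw [pvScrub1_cons_of_ne (by decide), pvScrub1_head, pvScrub1_length,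
            pvScrub1_of_not_mem hl', pvScan]
        simp [List.map_const']
      · by_cases hl : c = 'l'
        · subst hl
          rw [pvScrub1_cons_of_ne (by decide), pvScrub1_cons_of_ne (by decide),
              pvScrub1_head, pvScrub1_length, pvScrub1_length]
          rw [pvScan]
          simp [List.map_const']
        · rw [pvScrub1_cons_of_ne hi, pvScrub1_cons_of_ne ho, pvScrub1_cons_of_ne hl, ih]
          rw [pvScan]
          simp [hi, ho, hl]

-- the scan's output contains no forbidden letter
theorem pvScan_no_forb (cs : List Char) :
    ∀ x ∈ pvScan cs, ¬(x = 'i' ∨ x = 'o' ∨ x = 'l') := by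
  induction cs with
  | nil => simp [pvScan]
  | cons c cs ih =>
    rw [pvScan]
    by_cases hc : (c == 'i' || c == 'o' || c == 'l') = true
    · rw [if_pos hc]
      intro x hx
      rcases List.mem_cons.mp hx with h | h
      · subst h
        have hc' : c = 'i' ∨ c = 'o' ∨ c = 'l' := by
          simp only [Bool.or_eq_true, beq_iff_eq] at hc; tauto
        rcases hc' with rfl | rfl | rfl <;> decide
      · obtain ⟨y, _, rfl⟩ := List.mem_map.mp h
        decide
    · rw [if_neg hc]
      intro x hx
      rcases List.mem_cons.mp hx with rfl | h
      · simp only [Bool.or_eq_true, beq_iff_eq] at hc; tauto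
      · exact ih x h

-- the scan is the identity on forbidden-free input
theorem pvScan_id {cs : List Char} (h : ∀ x ∈ cs, ¬(x = 'i' ∨ x = 'o' ∨ x = 'l')) :
    pvScan cs = cs := by
  induction cs with
  | nil => rfl
  | cons c cs ih =>
    have hc : ¬(c = 'i' ∨ c = 'o' ∨ c = 'l') := h c (List.mem_cons_self)
    rw [pvScan, if_neg (by simp only [Bool.or_eq_true, beq_iff_eq]; tauto),
      ih (fun x hx => h x (List.mem_cons_of_mem _ hx))]

-- the scan preserves "some character is not 'z'"
theorem pvScan_nz {cs : List Char} (h : ∃ x ∈ cs, x ≠ 'z') :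
    ∃ x ∈ pvScan cs, x ≠ 'z' := by
  induction cs with
  | nil => simpa using h
  | cons c cs ih =>
    rw [pvScan]
    by_cases hc : (c == 'i' || c == 'o' || c == 'l') = true
    · rw [if_pos hc]
      refine ⟨Char.ofNat (c.toNat + 1), List.mem_cons_self, ?_⟩
      have hc' : c = 'i' ∨ c = 'o' ∨ c = 'l' := by
        simp only [Bool.or_eq_true, beq_iff_eq] at hc; tauto
      rcases hc' with rfl | rfl | rfl <;> decide
    · rw [if_neg hc]
      obtain ⟨x, hx, hxz⟩ := h
      rcases List.mem_cons.mp hx with rfl | hx'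
      · exact ⟨x, List.mem_cons_self, hxz⟩
      · obtain ⟨y, hy, hyz⟩ := ih ⟨x, hx', hxz⟩
        exact ⟨y, List.mem_cons_of_mem _ hy, hyz⟩

-- rstrip('z') removes a trailing 'z'
theorem pvRstripZ_append_z (ds : List Char) :
    pvRstripZ (ds ++ ['z']) = pvRstripZ ds := by
  unfold pvRstripZ
  simp [List.dropWhile]

-- rstrip('z') keeps a non-'z' last character
theorem pvRstripZ_append_ne {c : Char} (h : c ≠ 'z') (ds : List Char) :
    pvRstripZ (ds ++ [c]) = ds ++ [c] := by
  unfold pvRstripZ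
  simp [List.dropWhile, h]

-- rstrip never lengthens
theorem pvRstripZ_length_le (cs : List Char) : (pvRstripZ cs).length ≤ cs.length := by
  unfold pvRstripZ
  rw [List.length_reverse]
  exact (List.length_dropWhile_le _ _).trans (le_of_eq (List.length_reverse))

-- on forbidden-free, not-all-'z' input, A's recursion computes B's rstrip-and-bump
theorem pvCore_eq : ∀ cs : List Char, (∀ x ∈ cs, ¬(x = 'i' ∨ x = 'o' ∨ x = 'l')) →
    (∃ x ∈ cs, x ≠ 'z') →
    ∃ c, PySem.List.pyGet? (pvRstripZ cs) (-1) = some c ∧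
      nextTryCore cs = PySem.List.slice (pvRstripZ cs) none (some (-1))
        ++ [Char.ofNat (c.toNat + 1)] ++ List.replicate (cs.length - (pvRstripZ cs).length) 'a' := by
  intro cs
  induction cs using List.reverseRecOn with
  | nil => intro _ hz; simp at hz
  | append_singleton ds c ih =>
    intro hf hz
    have hscrub : pvScrub1 (pvScrub1 (pvScrub1 (ds ++ [c]) 'i' 'j') 'o' 'p') 'l' 'm'
        = ds ++ [c] := by
      rw [pvScrubA_eq_scan]; exact pvScan_id hf
    rw [nextTryCore_unfold]
    simp only [hscrub, PySem.List.pyGet?_neg_one_append_singleton,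
      PySem.List.slice_to_neg_one, List.dropLast_concat]
    by_cases hcz : c = 'z'
    · subst hcz
      rw [if_pos rfl, pvRstripZ_append_z]
      have hz' : ∃ x ∈ ds, x ≠ 'z' := by
        obtain ⟨x, hx, hxz⟩ := hz
        rcases List.mem_append.mp hx with hx' | hx'
        · exact ⟨x, hx', hxz⟩
        · simp at hx'; subst hx'; simp at hxz
      obtain ⟨e, he1, he2⟩ := ih (fun x hx => hf x (List.mem_append_left _ hx)) hz'
      have hle : (pvRstripZ ds).length ≤ ds.length := pvRstripZ_length_le ds
      refine ⟨e, he1, ?_⟩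
      have hrep : List.replicate (ds.length - (pvRstripZ ds).length) 'a' ++ ['a']
          = List.replicate (ds.length + 1 - (pvRstripZ ds).length) 'a' := by
        rw [show ds.length + 1 - (pvRstripZ ds).length
              = (ds.length - (pvRstripZ ds).length) + 1 by omega,
            List.replicate_succ']
      rw [he2]
      simp only [List.append_assoc, List.length_append, List.length_singleton, ← hrep,
        PySem.List.slice_to_neg_one]
    · rw [if_neg hcz, pvRstripZ_append_ne hcz]
      refine ⟨c, by simp [PySem.List.pyGet?_neg_one_append_singleton], ?_⟩
      simp [PySem.List.slice_to_neg_one]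

-- ===== VERDICT (by name: the statement is the Claim_ definition above) =====
theorem next_try_spec : Claim_equal_next_try := by
  unfold Claim_equal_next_try
  intro pwd _ hpre
  unfold Pre_next_try at hpre
  unfold Spec_next_try next_try next_try_alt
  have hz : ∃ x ∈ pwd.toList, x ≠ 'z' := by
    simp only [List.any_eq_true, Bool.not_eq_eq_eq_not, Bool.not_true, beq_eq_false_iff_ne,
      ne_eq] at hpre
    exact hpre
  have hcore : nextTryCore pwd.toList = nextTryCore (pvScan pwd.toList) := by
    rw [nextTryCore_unfold, nextTryCore_unfold (pvScan pwd.toList)]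
    simp only [pvScrubA_eq_scan, pvScan_id (pvScan_no_forb pwd.toList)]
  obtain ⟨c, hc1, hc2⟩ :=
    pvCore_eq (pvScan pwd.toList) (pvScan_no_forb pwd.toList) (pvScan_nz hz)
  rw [hcore, hc2]
  simp only [hc1]
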